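-- pv_equiv track=rewrite | github.com/eliavw/mercs-v5 | src/mercs/utils/utils.py | queries_to_codes
-- ===== SOURCE A (Python) =====
-- def query_to_code(q_desc, q_targ, q_miss, atts=None):
--     if atts is None:
--         atts = determine_atts(q_desc, q_targ, q_miss)
--
--     code = [encode_attribute(a, q_desc, q_targ) for a in atts]
--
--     return code
--
-- def queries_to_codes(q_desc, q_targ, q_miss, atts=None):
--     assert len(q_desc) == len(q_targ) == len(q_miss)
--     nb_queries = len(q_desc)
--
--     if atts is None:
--         atts = determine_atts(q_desc[0], q_targ[0], q_miss[0])
--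
--     codes = [query_to_code(q_desc[i], q_targ[i], q_miss[i], atts=atts)
--              for i in range(nb_queries)]
--
--     return codes
--
-- def determine_atts(desc, targ, miss):
--     """
--     Determine the entire list of attributes.
--     """
--     atts = list(set(desc + targ + miss))
--     atts.sort()
--     return atts
--
-- def encode_attribute(att, desc, targ):
--     """
--     Encode the 'role' of an attribute in a model.
--
--     `Role` means:
--         - Descriptive attribute (input)
--         - Target attribute (output)
--         - Missing attribute (not relevant to the model)
--     """
--
--     check_desc = att in desc
--     check_targ = att in targ
--
--     code_int = check_targ * 2 + check_desc - 1
--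
--     return code_int
-- ===== SOURCE B (Python) =====
-- def queries_to_codes(q_desc, q_targ, q_miss, atts=None):
--     assert len(q_desc) == len(q_targ) == len(q_miss)
--
--     if atts is None:
--         atts = sorted(set(q_desc[0] + q_targ[0] + q_miss[0]))
--
--     # position table: attribute -> all positions where it occurs in atts
--     pos = {}
--     for i, a in enumerate(atts):
--         pos.setdefault(a, []).append(i)
--
--     codes = []
--     for desc, targ in zip(q_desc, q_targ):
--         # scatter roles into a code array initialized to -1 (missing)
--         code = [-1] * len(atts)
--         for a in set(desc):
--             for i in pos.get(a, ()):
--                 code[i] += 1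
--         for a in set(targ):
--             for i in pos.get(a, ()):
--                 code[i] += 2
--         codes.append(code)
--     return codes
-- ===== Notes on version B (the rewrite author's own statement) =====
-- stated objective: faster
-- what changed: B inverts A's gather into a scatter: it builds a position table att->positions over atts once, then per query initializes a code array to -1 and writes +1/+2 into it while iterating over set(desc)/set(targ), instead of A's per-attribute membership scans of desc and targ for every attribute of every query; queries are paired by zip instead of an index loop.
import Mathlib
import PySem

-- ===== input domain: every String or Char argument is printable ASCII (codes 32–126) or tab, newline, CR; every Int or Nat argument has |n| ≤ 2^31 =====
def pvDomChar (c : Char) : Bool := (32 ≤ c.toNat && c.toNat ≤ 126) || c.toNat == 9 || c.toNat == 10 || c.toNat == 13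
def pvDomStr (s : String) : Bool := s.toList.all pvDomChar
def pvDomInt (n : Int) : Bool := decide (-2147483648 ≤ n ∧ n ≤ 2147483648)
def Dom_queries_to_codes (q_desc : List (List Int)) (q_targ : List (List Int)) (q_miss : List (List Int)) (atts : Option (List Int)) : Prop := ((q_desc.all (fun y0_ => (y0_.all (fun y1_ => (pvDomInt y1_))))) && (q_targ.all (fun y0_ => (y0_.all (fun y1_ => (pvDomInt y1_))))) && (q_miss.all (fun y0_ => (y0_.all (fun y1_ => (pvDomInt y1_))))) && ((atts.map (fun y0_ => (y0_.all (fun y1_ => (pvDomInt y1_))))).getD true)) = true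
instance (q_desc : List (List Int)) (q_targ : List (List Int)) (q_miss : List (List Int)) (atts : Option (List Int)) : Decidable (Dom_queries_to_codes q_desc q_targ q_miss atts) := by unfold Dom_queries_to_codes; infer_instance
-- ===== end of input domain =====

-- B inverts A's gather into a scatter: a position table over atts is built once, and per query
-- the role lists are written (+1 desc, +2 targ) into a code array initialized to -1 (objective: faster).

-- ===== PORT A =====
def encode_attribute (att : Int) (desc : List Int) (targ : List Int) : Int :=
  let check_desc := desc.contains att
  let check_targ := targ.contains att
  (if check_targ then (1:Int) else 0) * 2 + (if check_desc then (1:Int) else 0) - 1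

def determine_atts (desc : List Int) (targ : List Int) (miss : List Int) : List Int :=
  PySem.List.sorted (PySem.Set.ofList (desc ++ targ ++ miss)) (fun x => x) false

def query_to_code (desc : List Int) (targ : List Int) (miss : List Int) (atts : Option (List Int)) : List Int :=
  let atts' := match atts with
    | none => determine_atts desc targ miss
    | some a => a
  atts'.map (fun a => encode_attribute a desc targ)

def queries_to_codes (q_desc : List (List Int)) (q_targ : List (List Int)) (q_miss : List (List Int)) (atts : Option (List Int)) : List (List Int) :=
  let nb_queries : Int := PySem.List.len q_desc
  let atts' := match atts with
    | none => determine_atts (PySem.List.pyGetD q_desc 0 []) (PySem.List.pyGetD q_targ 0 []) (PySem.List.pyGetD q_miss 0 [])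
    | some a => a
  (PySem.List.pyRange 0 nb_queries 1).map (fun i =>
    query_to_code (PySem.List.pyGetD q_desc i []) (PySem.List.pyGetD q_targ i []) (PySem.List.pyGetD q_miss i []) (some atts'))

-- ===== PORT B =====
-- pos = {}; for i, a in enumerate(atts): pos.setdefault(a, []).append(i)
def build_pos (atts : List Int) : PySem.Dict Int (List Int) :=
  (PySem.List.enumerate atts 0).foldl
    (fun d p => d.insert p.2 (d.getD p.2 [] ++ [p.1])) PySem.Dict.empty

-- 'for i in idxs: code[i] += k'; indices come from enumerate(atts) with len(code) = len(atts),
-- so every i satisfies 0 ≤ i < len(code) and .toNat/.set/.getD are exact here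
def bumpAll (code : List Int) (idxs : List Int) (k : Int) : List Int :=
  idxs.foldl (fun c i => c.set i.toNat (c.getD i.toNat 0 + k)) code

def code_of_query (pos : PySem.Dict Int (List Int)) (n : Nat) (desc targ : List Int) : List Int :=
  let code := List.replicate n (-1 : Int)
  let code := (PySem.Set.ofList desc).foldl (fun c a => bumpAll c (pos.getD a []) 1) code
  (PySem.Set.ofList targ).foldl (fun c a => bumpAll c (pos.getD a []) 2) code

def queries_to_codes_alt (q_desc : List (List Int)) (q_targ : List (List Int)) (q_miss : List (List Int)) (atts : Option (List Int)) : List (List Int) :=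
  let atts' := match atts with
    | none => PySem.List.sorted
        (PySem.Set.ofList (PySem.List.pyGetD q_desc 0 [] ++ PySem.List.pyGetD q_targ 0 [] ++ PySem.List.pyGetD q_miss 0 []))
        (fun x => x) false
    | some a => a
  let pos := build_pos atts'
  (q_desc.zip q_targ).map (fun dt => code_of_query pos atts'.length dt.1 dt.2)

-- ===== PRECONDITION & SPEC =====
-- Pre_ excludes inputs on which Python A raises: unequal lengths (AssertionError) and
-- atts=None with empty query lists (IndexError on q_desc[0]).
def Pre_queries_to_codes (q_desc : List (List Int)) (q_targ : List (List Int)) (q_miss : List (List Int)) (atts : Option (List Int)) : Prop :=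
  q_desc.length = q_targ.length ∧ q_targ.length = q_miss.length ∧ (atts = none → q_desc ≠ [])
instance (q_desc : List (List Int)) (q_targ : List (List Int)) (q_miss : List (List Int)) (atts : Option (List Int)) : Decidable (Pre_queries_to_codes q_desc q_targ q_miss atts) := by unfold Pre_queries_to_codes; infer_instance

def pvWitness_queries_to_codes : List (List Int) × List (List Int) × List (List Int) × Option (List Int) :=
  ([[0, 1], [2]], [[2], [0]], [[3], [1, 3]], none)

def Spec_queries_to_codes (q_desc : List (List Int)) (q_targ : List (List Int)) (q_miss : List (List Int)) (atts : Option (List Int)) (out : List (List Int)) : Prop := out = queries_to_codes_alt q_desc q_targ q_miss atts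
instance (q_desc : List (List Int)) (q_targ : List (List Int)) (q_miss : List (List Int)) (atts : Option (List Int)) (out : List (List Int)) : Decidable (Spec_queries_to_codes q_desc q_targ q_miss atts out) := by unfold Spec_queries_to_codes; infer_instance

-- ===== CLAIM (what is proved, stated in full; the proofs are below) =====
def Claim_equal_queries_to_codes : Prop := ∀ (q_desc : List (List Int)) (q_targ : List (List Int)) (q_miss : List (List Int)) (atts : Option (List Int)), Dom_queries_to_codes q_desc q_targ q_miss atts → Pre_queries_to_codes q_desc q_targ q_miss atts → Spec_queries_to_codes q_desc q_targ q_miss atts (queries_to_codes q_desc q_targ q_miss atts)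

-- ===== LEMMAS AND PROOFS =====

-- the pos-building fold, characterized: pos[a] collects the first components of the pairs whose second is a
theorem foldl_setdefault_append (ps : List (Int × Int)) (d : PySem.Dict Int (List Int)) (a : Int) :
    (ps.foldl (fun d p => d.insert p.2 (d.getD p.2 [] ++ [p.1])) d).getD a []
      = d.getD a [] ++ (ps.filter (fun p => p.2 == a)).map (·.1) := by
  induction ps generalizing d with
  | nil => simp
  | cons p ps ih =>
      simp only [List.foldl_cons, ih, PySem.Dict.getD_insert, List.filter_cons]
      by_cases h : p.2 = a
      · simp [h, List.append_assoc]
      · simp [h, Ne.symm h]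

theorem mem_build_pos (atts : List Int) (a i : Int) :
    i ∈ (build_pos atts).getD a []
      ↔ ∃ (k : Nat) (h : k < atts.length), i = (k : Int) ∧ atts[k] = a := by
  unfold build_pos
  rw [foldl_setdefault_append]
  simp only [PySem.Dict.getD_empty, List.nil_append, List.mem_map, List.mem_filter,
    PySem.List.mem_enumerate_iff]
  constructor
  · rintro ⟨p, ⟨⟨k, hk, rfl⟩, hpa⟩, rfl⟩
    exact ⟨k, hk, by simp, by simpa using hpa⟩
  · rintro ⟨k, hk, rfl, hka⟩
    exact ⟨((0 : Int) + k, atts[k]), ⟨⟨k, hk, rfl⟩, by simpa using hka⟩, by simp⟩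

theorem nodup_build_pos (atts : List Int) (a : Int) :
    ((build_pos atts).getD a []).Nodup := by
  unfold build_pos
  rw [foldl_setdefault_append]
  simp only [PySem.Dict.getD_empty, List.nil_append]
  have h1 : ((PySem.List.enumerate atts 0).filter (fun p => p.2 == a)).Pairwise
      (fun p q => p.1 < q.1) := (PySem.List.pairwise_lt_enumerate atts 0).filter _
  exact (List.pairwise_map.mpr h1).imp (fun h => ne_of_lt h)

-- bumpAll preserves length
theorem length_bumpAll (idxs : List Int) (code : List Int) (k : Int) :
    (bumpAll code idxs k).length = code.length := by
  unfold bumpAll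
  induction idxs generalizing code with
  | nil => rfl
  | cons i idxs ih =>
      simp only [List.foldl_cons]
      rw [ih]
      simp

-- bumpAll over a nodup list of in-range indices adds k exactly at those positions
theorem getD_bumpAll (idxs : List Int) (code : List Int) (k : Int) (j : Nat)
    (hnd : idxs.Nodup) (hin : ∀ i ∈ idxs, 0 ≤ i ∧ i.toNat < code.length)
    (hj : j < code.length) :
    (bumpAll code idxs k).getD j 0
      = if (j : Int) ∈ idxs then code.getD j 0 + k else code.getD j 0 := by
  unfold bumpAll
  induction idxs generalizing code with
  | nil => simp
  | cons i idxs ih =>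
      obtain ⟨hi0, hilt⟩ := hin i List.mem_cons_self
      have hlen : (code.set i.toNat (code.getD i.toNat 0 + k)).length = code.length := by simp
      have ihres := ih (code.set i.toNat (code.getD i.toNat 0 + k)) hnd.of_cons
        (fun x hx => by rw [hlen]; exact hin x (List.mem_cons_of_mem _ hx)) (hlen ▸ hj)
      simp only [List.foldl_cons] at *
      rw [ihres]
      by_cases hmem : (j : Int) ∈ idxs
      · have hne : i ≠ (j : Int) := fun he => (List.nodup_cons.mp hnd).1 (he ▸ hmem)
        have hne' : i.toNat ≠ j := fun he => hne (by omega)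
        simp [hmem, List.getD_eq_getElem?_getD, List.getElem?_set_ne hne']
      · by_cases hij : (j : Int) = i
        · have : i.toNat = j := by omega
          subst this
          have hmemc : ((i.toNat : Nat) : Int) ∈ i :: idxs := by
            rw [hij]; exact List.mem_cons_self
          rw [if_neg hmem, if_pos hmemc]
          simp [List.getD_eq_getElem?_getD, hilt]
        · have hne' : i.toNat ≠ j := fun he => hij (by omega)
          simp [hmem, hij, List.getD_eq_getElem?_getD, List.getElem?_set_ne hne']

-- scatter of one role list S (a set) through the pos table: +k exactly where atts[j] ∈ S
theorem length_scatter (S : List Int) (atts : List Int) (c : List Int) (k : Int) :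
    (S.foldl (fun c a => bumpAll c ((build_pos atts).getD a []) k) c).length = c.length := by
  induction S generalizing c with
  | nil => rfl
  | cons a S ih => simp [ih, length_bumpAll]

theorem getD_scatter (S : List Int) (atts : List Int) (c : List Int) (k : Int) (j : Nat)
    (hnd : S.Nodup) (hc : c.length = atts.length) (hj : j < atts.length) :
    (S.foldl (fun c a => bumpAll c ((build_pos atts).getD a []) k) c).getD j 0
      = if atts[j] ∈ S then c.getD j 0 + k else c.getD j 0 := by
  induction S generalizing c with
  | nil => simp
  | cons a S ih =>
      have hposmem : ∀ i ∈ (build_pos atts).getD a [], 0 ≤ i ∧ i.toNat < c.length := by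
        intro i hi
        obtain ⟨m, hm, rfl, _⟩ := (mem_build_pos atts a i).mp hi
        constructor
        · exact Int.natCast_nonneg m
        · simpa [hc] using hm
      have hbump : (bumpAll c ((build_pos atts).getD a []) k).getD j 0
          = if atts[j] = a then c.getD j 0 + k else c.getD j 0 := by
        rw [getD_bumpAll _ _ _ _ (nodup_build_pos atts a) hposmem (by omega)]
        by_cases hja : atts[j] = a
        · have : (j : Int) ∈ (build_pos atts).getD a [] :=
            (mem_build_pos atts a j).mpr ⟨j, hj, rfl, hja⟩
          simp [this, hja]
        · have : (j : Int) ∉ (build_pos atts).getD a [] := by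
            intro hmem
            obtain ⟨m, hm, hjm, hma⟩ := (mem_build_pos atts a _).mp hmem
            have : m = j := by omega
            exact hja (this ▸ hma)
          simp [this, hja]
      simp only [List.foldl_cons]
      rw [ih _ hnd.of_cons (by rw [length_bumpAll]; exact hc), hbump]
      by_cases h1 : atts[j] = a
      · have h2 : atts[j] ∉ S := fun hm => (List.nodup_cons.mp hnd).1 (h1 ▸ hm)
        have hmemc : atts[j] ∈ a :: S := by rw [h1]; exact List.mem_cons_self
        rw [if_neg h2, if_pos h1, if_pos hmemc]
      · by_cases h2 : atts[j] ∈ S <;> simp [h1, h2]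

-- per query, B's scatter reproduces A's per-attribute membership code
theorem code_of_query_eq (atts desc targ : List Int) :
    code_of_query (build_pos atts) atts.length desc targ
      = atts.map (fun a => encode_attribute a desc targ) := by
  show ((PySem.Set.ofList targ).foldl (fun c a => bumpAll c ((build_pos atts).getD a []) 2)
      ((PySem.Set.ofList desc).foldl (fun c a => bumpAll c ((build_pos atts).getD a []) 1)
        (List.replicate atts.length (-1 : Int))))
    = atts.map (fun a => encode_attribute a desc targ)
  set c0 : List Int := List.replicate atts.length (-1 : Int) with hc0
  set c1 := (PySem.Set.ofList desc).foldl
      (fun c a => bumpAll c ((build_pos atts).getD a []) 1) c0 with hc1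
  have hlen0 : c0.length = atts.length := by simp [hc0]
  have hlen1 : c1.length = atts.length := by rw [hc1, length_scatter]; exact hlen0
  have hlen2 : ((PySem.Set.ofList targ).foldl
      (fun c a => bumpAll c ((build_pos atts).getD a []) 2) c1).length = atts.length := by
    rw [length_scatter]; exact hlen1
  apply List.ext_getElem (by rw [hlen2]; simp)
  intro j hjl hjr
  have hj : j < atts.length := by simpa [hlen2] using hjl
  have e2 := getD_scatter (PySem.Set.ofList targ) atts c1 2 j
    (PySem.Set.nodup_ofList targ) hlen1 hj
  have e1 := getD_scatter (PySem.Set.ofList desc) atts c0 1 j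
    (PySem.Set.nodup_ofList desc) hlen0 hj
  have e0 : c0.getD j 0 = -1 := by
    simp [hc0, List.getD_eq_getElem?_getD, hj]
  rw [List.getElem_map]
  rw [← List.getD_eq_getElem _ 0 hjl, e2, hc1, e1, e0]
  simp only [PySem.Set.mem_ofList, encode_attribute]
  by_cases hd : atts[j] ∈ desc <;> by_cases ht : atts[j] ∈ targ <;>
    simp [hd, ht]

-- A's index loop over range(len) equals B's zip loop, given equal lengths
theorem map_pyRange_eq_map_zip (xs ys : List (List Int)) (h : xs.length = ys.length)
    (f : List Int → List Int → List Int) :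
    (PySem.List.pyRange 0 (PySem.List.len xs) 1).map
        (fun i => f (PySem.List.pyGetD xs i []) (PySem.List.pyGetD ys i []))
      = (xs.zip ys).map (fun p => f p.1 p.2) := by
  apply List.ext_getElem
  · simp [PySem.List.length_pyRange_one, h]
  · intro k h1 h2
    have hk : k < xs.length := by
      simpa [PySem.List.length_pyRange_one] using h1
    simp only [List.getElem_map, PySem.List.getElem_pyRange_one, List.getElem_zip]
    have hx : PySem.List.pyGetD xs ((0:Int) + k) [] = xs[k] := by
      rw [zero_add, PySem.List.pyGetD_natCast]
      exact List.getD_eq_getElem xs [] hk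
    have hy : PySem.List.pyGetD ys ((0:Int) + k) [] = ys[k]'(by omega) := by
      rw [zero_add, PySem.List.pyGetD_natCast]
      exact List.getD_eq_getElem ys [] (by omega)
    rw [hx, hy]

-- ===== VERDICT =====
theorem queries_to_codes_spec : Claim_equal_queries_to_codes := by
  intro q_desc q_targ q_miss atts _ hpre
  obtain ⟨h1, _, _⟩ := hpre
  unfold Spec_queries_to_codes queries_to_codes queries_to_codes_alt
  have step : ∀ atts' : List Int,
      (PySem.List.pyRange 0 (PySem.List.len q_desc) 1).map (fun i =>
          query_to_code (PySem.List.pyGetD q_desc i []) (PySem.List.pyGetD q_targ i [])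
            (PySem.List.pyGetD q_miss i []) (some atts'))
        = (q_desc.zip q_targ).map (fun dt => code_of_query (build_pos atts') atts'.length dt.1 dt.2) := by
    intro atts'
    refine Eq.trans
      (map_pyRange_eq_map_zip q_desc q_targ h1
        (fun d t => atts'.map (fun a => encode_attribute a d t))) ?_
    exact List.map_congr_left (fun p _ => (code_of_query_eq atts' p.1 p.2).symm)
  cases atts with
  | some a => exact step a
  | none => exact step (determine_atts (PySem.List.pyGetD q_desc 0 []) (PySem.List.pyGetD q_targ 0 [])
      (PySem.List.pyGetD q_miss 0 []))
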